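-- pv_equiv track=rewrite | github.com/silune/Connect4 | connect4.py | new_key
-- ===== SOURCE A (Python) =====
-- def new_key(oldKey, play, turn):
--     """Renvoie une clé décrivant l'évolution du jeu après le début de l'exploration de l'arbre
--      -> chaque point '.' de la clé correspond à une colone, les nombres successifs entre les points donnent les coups, dans l'ordre, joués dans la colone associée"""
--     i = 0
--     newKey = ''
--     for char in oldKey:
--         if char == '.':
--             if i == play:
--                 newKey += str(turn)
--             i += 1
--         newKey += char
--     return newKey
-- ===== SOURCE B (Python) =====
-- def new_key(oldKey, play, turn):
--     dots = [i for i, c in enumerate(oldKey) if c == '.']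
--     if 0 <= play < len(dots):
--         p = dots[play]
--         return oldKey[:p] + str(turn) + oldKey[p:]
--     return oldKey
-- ===== Notes on version B (the rewrite author's own statement) =====
-- stated objective: alternative
-- what changed: B replaces A's single char-by-char scan with a running dot counter and string accumulator by collecting the dot positions once (enumerate+filter), indexing the play-th one, and splicing str(turn) in with two slices.
import Mathlib
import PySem

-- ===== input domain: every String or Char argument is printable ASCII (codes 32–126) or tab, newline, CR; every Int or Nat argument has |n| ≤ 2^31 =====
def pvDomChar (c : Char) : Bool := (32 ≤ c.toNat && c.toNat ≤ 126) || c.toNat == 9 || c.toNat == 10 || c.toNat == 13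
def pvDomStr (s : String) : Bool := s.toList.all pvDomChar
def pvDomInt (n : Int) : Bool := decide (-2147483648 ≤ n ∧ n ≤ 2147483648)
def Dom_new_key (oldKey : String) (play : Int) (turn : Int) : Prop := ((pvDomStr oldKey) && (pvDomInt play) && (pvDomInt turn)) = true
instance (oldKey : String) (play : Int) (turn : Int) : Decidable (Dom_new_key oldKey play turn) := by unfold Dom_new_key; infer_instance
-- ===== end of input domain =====

-- ===== PORT A =====
-- Header: B replaces A's char-by-char counter scan by "collect dot positions, splice at the play-th one" (objective: alternative decomposition, same cost).
def new_key (oldKey : String) (play : Int) (turn : Int) : String :=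
  let r := oldKey.toList.foldl (fun (st : Int × List Char) char =>
    let i := st.1
    let newKey := st.2
    if char = '.' then
      (i + 1, (if i = play then newKey ++ (PySem.Int.toStr turn).toList else newKey) ++ [char])
    else (i, newKey ++ [char])) (0, [])
  String.mk r.2

-- ===== PORT B =====
def new_key_alt (oldKey : String) (play : Int) (turn : Int) : String :=
  let cs := oldKey.toList
  let dots := ((PySem.List.enumerate cs).filter (fun p => p.2 == '.')).map (fun p => p.1)
  if 0 ≤ play ∧ play < (dots.length : Int) then
    let p := PySem.List.pyGetD dots play 0
    String.mk (PySem.List.slice cs none (some p) ++ (PySem.Int.toStr turn).toList ++ PySem.List.slice cs (some p) none)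
  else oldKey

-- ===== PRECONDITION & SPEC =====
def Spec_new_key (oldKey : String) (play : Int) (turn : Int) (out : String) : Prop := out = new_key_alt oldKey play turn
instance (oldKey : String) (play : Int) (turn : Int) (out : String) : Decidable (Spec_new_key oldKey play turn out) := by unfold Spec_new_key; infer_instance

-- ===== CLAIM (what is proved, stated in full; the proofs are below) =====
def Claim_equal_new_key : Prop := ∀ (oldKey : String) (play : Int) (turn : Int), Dom_new_key oldKey play turn → Spec_new_key oldKey play turn (new_key oldKey play turn)

-- ===== LEMMAS AND PROOFS =====

-- pvIns T cs p: what A builds — cs with T inserted before the p-th dot (counting from 0), cs unchanged if no p-th dot.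
def pvIns (T : List Char) : List Char → Int → List Char
  | [], _ => []
  | c :: cs, p =>
    if c = '.' then (if p = 0 then T else []) ++ c :: pvIns T cs (p - 1)
    else c :: pvIns T cs p

-- pvDots cs: the (Int) positions of '.' in cs.
def pvDots : List Char → List Int
  | [] => []
  | c :: cs => if c = '.' then 0 :: (pvDots cs).map (· + 1) else (pvDots cs).map (· + 1)

lemma pvDots_nonneg : ∀ (cs : List Char), ∀ x ∈ pvDots cs, 0 ≤ x := by
  intro cs
  induction cs with
  | nil => simp [pvDots]
  | cons c cs ih =>
    intro x hx
    simp only [pvDots] at hx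
    split_ifs at hx with hc
    · rw [List.mem_cons] at hx
      rcases hx with rfl | hx
      · exact le_refl 0
      · simp only [List.mem_map] at hx
        obtain ⟨y, hy, rfl⟩ := hx
        have := ih y hy; omega
    · simp only [List.mem_map] at hx
      obtain ⟨y, hy, rfl⟩ := hx
      have := ih y hy; omega

lemma enum_filter_dots : ∀ (cs : List Char) (s : Int),
    ((PySem.List.enumerate cs s).filter (fun p => p.2 == '.')).map (fun p => p.1)
      = (pvDots cs).map (· + s) := by
  intro cs
  induction cs with
  | nil => intro s; simp [PySem.List.enumerate, pvDots]
  | cons c cs ih =>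
    intro s
    by_cases hc : c = '.'
    · simp [PySem.List.enumerate, pvDots, hc, ih (s + 1), List.map_map]
      all_goals (intro a _; omega)
    · simp [PySem.List.enumerate, pvDots, hc, ih (s + 1), List.map_map]
      all_goals (intro a _; omega)

lemma foldA (T : List Char) (play : Int) : ∀ (cs : List Char) (i : Int) (acc : List Char),
    (cs.foldl (fun (st : Int × List Char) char =>
      if char = '.' then
        (st.1 + 1, (if st.1 = play then st.2 ++ T else st.2) ++ [char])
      else (st.1, st.2 ++ [char])) (i, acc)).2
      = acc ++ pvIns T cs (play - i) := by
  intro cs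
  induction cs with
  | nil => intro i acc; simp [pvIns]
  | cons c cs ih =>
    intro i acc
    simp only [List.foldl_cons]
    by_cases hc : c = '.'
    · subst hc
      simp only [if_true]
      rw [ih (i + 1)]
      have h1 : play - (i + 1) = play - i - 1 := by omega
      by_cases hip : i = play
      · simp [pvIns, hip]
      · have h2 : ¬ (play - i = 0) := by omega
        simp [pvIns, hip, h2, h1]
    · simp only [if_neg hc]
      rw [ih i]
      simp [pvIns, hc]

lemma pvIns_eq (T : List Char) : ∀ (cs : List Char) (p : Int),
    pvIns T cs p =
      if 0 ≤ p ∧ p < ((pvDots cs).length : Int) then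
        cs.take ((pvDots cs).getD p.toNat 0).toNat ++ T
          ++ cs.drop ((pvDots cs).getD p.toNat 0).toNat
      else cs := by
  intro cs
  induction cs with
  | nil => intro p; simp [pvIns, pvDots]
  | cons c cs ih =>
    intro p
    by_cases hc : c = '.'
    · subst hc
      simp only [pvIns, pvDots, if_true]
      by_cases hp : p = 0
      · subst hp
        have hcond : (0:Int) ≤ 0 ∧ (0:Int) < (((0 :: (pvDots cs).map (· + 1)).length : Nat) : Int) := by
          simp
        rw [if_pos hcond]
        have hneg : pvIns T cs (-1) = cs := by
          rw [ih]
          have : ¬ ((0:Int) ≤ -1 ∧ -1 < (((pvDots cs).length : Nat) : Int)) := by omega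
          rw [if_neg this]
        simp [hneg]
      · have hcond : ((0:Int) ≤ p ∧ p < (((0 :: (pvDots cs).map (· + 1)).length : Nat) : Int))
            ↔ ((0:Int) ≤ p - 1 ∧ p - 1 < (((pvDots cs).length : Nat) : Int)) := by
          simp; omega
        rw [ih]
        by_cases hin : (0:Int) ≤ p - 1 ∧ p - 1 < (((pvDots cs).length : Nat) : Int)
        · rw [if_pos hin, if_pos (hcond.mpr hin)]
          have hlt : (p - 1).toNat < (pvDots cs).length := by omega
          have hpt : p.toNat = (p - 1).toNat + 1 := by omega
          have hget : (0 :: (pvDots cs).map (· + 1)).getD p.toNat 0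
              = (pvDots cs).getD (p - 1).toNat 0 + 1 := by
            rw [hpt]
            simp only [List.getD_cons_succ]
            rw [List.getD_eq_getElem _ _ hlt, List.getD_eq_getElem _ _ (by simpa using hlt)]
            simp
          rw [hget]
          have hnn : 0 ≤ (pvDots cs).getD (p - 1).toNat 0 := by
            rw [List.getD_eq_getElem _ _ hlt]
            exact pvDots_nonneg cs _ (List.getElem_mem hlt)
          have htn : ((pvDots cs).getD (p - 1).toNat 0 + 1).toNat
              = ((pvDots cs).getD (p - 1).toNat 0).toNat + 1 := by omega
          rw [htn]
          simp [hp]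
        · rw [if_neg hin, if_neg (fun h => hin (hcond.mp h))]
          simp [hp]
    · simp only [pvIns, pvDots, if_neg hc]
      -- (character other than '.')
      rw [ih]
      have hlen : (((pvDots cs).map (· + 1)).length : Int) = ((pvDots cs).length : Int) := by simp
      by_cases hin : (0:Int) ≤ p ∧ p < (((pvDots cs).length : Nat) : Int)
      · rw [if_pos hin, if_pos (by rw [hlen]; exact hin)]
        have hlt : p.toNat < (pvDots cs).length := by omega
        have hget : ((pvDots cs).map (· + 1)).getD p.toNat 0
            = (pvDots cs).getD p.toNat 0 + 1 := by
          rw [List.getD_eq_getElem _ _ hlt, List.getD_eq_getElem _ _ (by simpa using hlt)]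
          simp
        rw [hget]
        have hnn : 0 ≤ (pvDots cs).getD p.toNat 0 := by
          rw [List.getD_eq_getElem _ _ hlt]
          exact pvDots_nonneg cs _ (List.getElem_mem hlt)
        have htn : ((pvDots cs).getD p.toNat 0 + 1).toNat
            = ((pvDots cs).getD p.toNat 0).toNat + 1 := by omega
        rw [htn]
        simp
      · rw [if_neg hin, if_neg (by rw [hlen]; exact hin)]

-- ===== VERDICT (by name: the statement is the Claim_ definition above) =====
theorem new_key_spec : Claim_equal_new_key := by
  intro oldKey play turn _
  unfold Spec_new_key new_key new_key_alt
  have hdots : ((PySem.List.enumerate oldKey.toList).filter (fun p => p.2 == '.')).map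
      (fun p => p.1) = pvDots oldKey.toList := by
    rw [enum_filter_dots oldKey.toList 0]
    simp
  simp only []
  rw [foldA ((PySem.Int.toStr turn).toList) play oldKey.toList 0 []]
  rw [pvIns_eq]
  rw [hdots]
  by_cases hin : (0:Int) ≤ play ∧ play < (((pvDots oldKey.toList).length : Nat) : Int)
  · rw [if_pos (by simpa using hin), if_pos (by simpa using hin)]
    have hlt : play.toNat < (pvDots oldKey.toList).length := by omega
    have hq : PySem.List.pyGetD (pvDots oldKey.toList) play 0
        = (pvDots oldKey.toList).getD play.toNat 0 := PySem.List.pyGetD_of_nonneg _ _ hin.1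
    have hnn : 0 ≤ (pvDots oldKey.toList).getD play.toNat 0 := by
      rw [List.getD_eq_getElem _ _ hlt]
      exact pvDots_nonneg _ _ (List.getElem_mem hlt)
    rw [hq, PySem.List.slice_to _ hnn, PySem.List.slice_from _ hnn]
    simp [play.sub_zero]
  · rw [if_neg (by simpa using hin), if_neg (by simpa using hin)]
    simp [String.mk]
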